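-- pv_equiv track=rewrite | github.com/Avonae/flibusta-telegram-bot | utils/pages.py | create_pages
-- ===== SOURCE A (Python) =====
-- def page_strings(max_books, author, book, link):
--     link = link[1:].replace('/', '_', 1)
--     first_text = f'🔎  Найдено всего книг: {max_books}  🔍\n\n' \
--                  f'📖 <b>{book}</b> -- <i>{author}</i> \n\n' \
--                  f'⬇ Скачать: /{link}\n\n\n'
--
--     other_text = f'📖 <b>{book}</b> -- <i>{author}</i> \n\n' \
--                  f'⬇ Скачать: /{link}\n\n\n' \
--
--
--     return first_text, other_text
--
-- def create_pages(books_dict: dict, max_books) -> list: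
--     # Разбиение всех найденных книг по спискам для вывода
--     page_with_5_books = []
--     i = 1
--     my_str = ''
--
--     for key, item in books_dict.items():
--         first_text, other_text = page_strings(max_books, book=item[0],
--                                               author=item[1], link=key)
--
--         if max_books < 5:
--             # Если кол-во книг меньше 5
--             if i == 1:
--                 my_str += first_text
--             else:
--                 my_str += other_text
--             i += 1
--
--         if max_books > 5:
--             if i == 1:
--                 my_str += first_text
--             elif i % 5 != 0:
--                 my_str += other_text
--             elif i % 5 == 0:
--                 my_str += other_text
--                 page_with_5_books.append([my_str])
--                 my_str = ''
--             i += 1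
--     page_with_5_books.append([my_str])
--     return page_with_5_books
-- ===== SOURCE B (Python) =====
-- def create_pages(books_dict: dict, max_books) -> list:
--     # One pass to render every book's entry, then slice the renders into pages of five.
--     def book_text(key, item):
--         link = key[1:].replace('/', '_', 1)
--         return f'📖 <b>{item[0]}</b> -- <i>{item[1]}</i> \n\n' \
--                f'⬇ Скачать: /{link}\n\n\n'
--
--     texts = [book_text(key, item) for key, item in books_dict.items()]
--     if texts:
--         texts[0] = f'🔎  Найдено всего книг: {max_books}  🔍\n\n' + texts[0]
--
--     if max_books <= 5:
--         return [[''.join(texts)]]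
--     return [[''.join(texts[j:j + 5])] for j in range(0, len(texts), 5)]
-- ===== Notes on version B (the rewrite author's own statement) =====
-- stated objective: alternative
-- what changed: B renders every book's entry once with a comprehension (prefixing the header onto the first render), then branches once on max_books and slices the render list into pages of five with range(0, len, 5), replacing A's single fold that interleaves text choice, a 1-based counter and modulo-5 flush logic; Pre_ excludes only inputs where A raises IndexError (a value list shorter than 2), where B raises too.
-- intended difference: On max_books == 5 with a nonempty dict A returns [['']] (neither its <5 nor its >5 branch fires, so no book is rendered), and on max_books > 5 with a book count that is a multiple of five A appends a trailing blank page; B returns the five books on one page resp. only the non-empty pages, which is what the pagination is for. — e.g. on create_pages([("/b_1", ["T", "A"])], 5): A returns [[""]], B returns [["🔎 Найдено всего книг: 5 🔍\n\n📖 <b>T</b> -- <i>A</i> \n\n⬇ Скачать: /b_1\n\n\n"]]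
import Mathlib
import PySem

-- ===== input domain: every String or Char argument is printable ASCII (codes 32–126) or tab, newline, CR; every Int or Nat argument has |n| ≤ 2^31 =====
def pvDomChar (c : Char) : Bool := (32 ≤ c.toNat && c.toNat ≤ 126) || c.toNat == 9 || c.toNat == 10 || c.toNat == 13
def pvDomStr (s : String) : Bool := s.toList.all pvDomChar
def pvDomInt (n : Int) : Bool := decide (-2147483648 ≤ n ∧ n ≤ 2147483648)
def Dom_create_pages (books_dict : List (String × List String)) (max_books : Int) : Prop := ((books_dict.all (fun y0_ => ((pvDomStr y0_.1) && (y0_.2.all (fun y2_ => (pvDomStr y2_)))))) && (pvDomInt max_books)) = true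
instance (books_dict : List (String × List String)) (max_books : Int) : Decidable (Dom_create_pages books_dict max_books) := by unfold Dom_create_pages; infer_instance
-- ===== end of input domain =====

-- B renders every book's entry once with a comprehension, then slices the renders into
-- pages of five (objective: alternative decomposition); where A's paging is evidently
-- wrong (see D_ below) B returns the intended pages instead.

-- ===== PORT A =====
-- key[1:].replace('/', '_', 1): hand-ported, exact — Python's str.replace with count 1
-- replaces only the FIRST occurrence (PySem.Str.replace has no count form); both Pythons
-- contain this identical line, so both ports use this helper.
def pvReplFirstSlash : List Char → List Char
  | [] => []
  | c :: r => if c = '/' then '_' :: r else c :: pvReplFirstSlash r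

def pvLink (key : String) : String :=
  String.ofList (pvReplFirstSlash (PySem.Str.slice key (some 1) none).toList)

def page_strings (max_books : Int) (author book link : String) : String × String :=
  let link := pvLink link
  let first_text := "🔎  Найдено всего книг: " ++ PySem.Int.toStr max_books ++ "  🔍\n\n" ++
                    ("📖 <b>" ++ book ++ "</b> -- <i>" ++ author ++ "</i> \n\n" ++
                     "⬇ Скачать: /" ++ link ++ "\n\n\n")
  let other_text := "📖 <b>" ++ book ++ "</b> -- <i>" ++ author ++ "</i> \n\n" ++
                    "⬇ Скачать: /" ++ link ++ "\n\n\n"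
  (first_text, other_text)

-- the loop body of A (item[0]/item[1] as pyGetD, total under Pre_: every value list has length ≥ 2)
def pvStepA (max_books : Int) (st : List (List String) × Int × String) (kv : String × List String) :
    List (List String) × Int × String :=
  let pages := st.1
  let i := st.2.1
  let my_str := st.2.2
  let fo := page_strings max_books (PySem.List.pyGetD kv.2 1 "") (PySem.List.pyGetD kv.2 0 "") kv.1
  if max_books < 5 then
    (pages, i + 1, if i == 1 then my_str ++ fo.1 else my_str ++ fo.2)
  else if max_books > 5 then
    if i == 1 then (pages, i + 1, my_str ++ fo.1)
    else if PySem.Int.mod i 5 ≠ 0 then (pages, i + 1, my_str ++ fo.2)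
    else (pages ++ [[my_str ++ fo.2]], i + 1, "")
  else (pages, i, my_str)

def create_pages (books_dict : List (String × List String)) (max_books : Int) : List (List String) :=
  let st := books_dict.foldl (pvStepA max_books) ([], 1, "")
  st.1 ++ [[st.2.2]]

-- ===== PORT B =====
def pvBodyText (key : String) (item : List String) : String :=
  let link := pvLink key
  "📖 <b>" ++ PySem.List.pyGetD item 0 "" ++ "</b> -- <i>" ++ PySem.List.pyGetD item 1 "" ++ "</i> \n\n" ++
  "⬇ Скачать: /" ++ link ++ "\n\n\n"

def pvHeader (max_books : Int) : String :=
  "🔎  Найдено всего книг: " ++ PySem.Int.toStr max_books ++ "  🔍\n\n"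

-- if texts: texts[0] = header + texts[0]
def pvHeadered (max_books : Int) : List String → List String
  | [] => []
  | t :: r => (pvHeader max_books ++ t) :: r

def create_pages_alt (books_dict : List (String × List String)) (max_books : Int) : List (List String) :=
  let texts := pvHeadered max_books (books_dict.map (fun kv => pvBodyText kv.1 kv.2))
  if max_books ≤ 5 then [[PySem.Str.join "" texts]]
  else (PySem.List.pyRange 0 texts.length 5).map
    (fun j => [PySem.Str.join "" (PySem.List.slice texts (some j) (some (j + 5)))])

-- ===== PRECONDITION & SPEC =====
-- Pre_ excludes exactly the inputs where Python A raises IndexError (item[1] on a value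
-- list with fewer than two entries); B raises there too.
def Pre_create_pages (books_dict : List (String × List String)) (max_books : Int) : Prop :=
  ∀ kv ∈ books_dict, 2 ≤ kv.2.length
instance (books_dict : List (String × List String)) (max_books : Int) : Decidable (Pre_create_pages books_dict max_books) := by unfold Pre_create_pages; infer_instance

def pvWitness_create_pages : (List (String × List String)) × Int := ([("/b_1", ["Title", "Author"])], 7)

-- On max_books == 5 with a nonempty dict A returns [['']] (its <5/>5 branches both skip, so no
-- book is ever rendered), and on max_books > 5 with len(books_dict) a multiple of 5 A appends a
-- trailing blank page; B returns the five books on one page resp. only the non-empty pages,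
-- which is what the pagination is for.
def D_create_pages (books_dict : List (String × List String)) (max_books : Int) : Prop :=
  (max_books = 5 ∧ books_dict ≠ []) ∨ (5 < max_books ∧ books_dict.length % 5 = 0)
instance (books_dict : List (String × List String)) (max_books : Int) : Decidable (D_create_pages books_dict max_books) := by unfold D_create_pages; infer_instance

def Spec_create_pages (books_dict : List (String × List String)) (max_books : Int) (out : List (List String)) : Prop := ¬ D_create_pages books_dict max_books → out = create_pages_alt books_dict max_books
instance (books_dict : List (String × List String)) (max_books : Int) (out : List (List String)) : Decidable (Spec_create_pages books_dict max_books out) := by unfold Spec_create_pages; infer_instance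

def pvDiffWitness_create_pages : (List (String × List String)) × Int := ([("/b_1", ["T", "A"])], 5)
def pvDiffWitnessOut_create_pages : (List (List String)) × (List (List String)) :=
  ([[""]],
   [["🔎  Найдено всего книг: 5  🔍\n\n📖 <b>T</b> -- <i>A</i> \n\n⬇ Скачать: /b_1\n\n\n"]])

-- ===== CLAIM (what is proved, stated in full; the proofs are below) =====
def Claim_unchanged_create_pages : Prop := ∀ (books_dict : List (String × List String)) (max_books : Int), Dom_create_pages books_dict max_books → Pre_create_pages books_dict max_books → Spec_create_pages books_dict max_books (create_pages books_dict max_books)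
def Claim_changed_create_pages : Prop := Dom_create_pages (pvDiffWitness_create_pages.1) (pvDiffWitness_create_pages.2) ∧ Pre_create_pages (pvDiffWitness_create_pages.1) (pvDiffWitness_create_pages.2) ∧ D_create_pages (pvDiffWitness_create_pages.1) (pvDiffWitness_create_pages.2) ∧ create_pages (pvDiffWitness_create_pages.1) (pvDiffWitness_create_pages.2) = pvDiffWitnessOut_create_pages.1 ∧ create_pages_alt (pvDiffWitness_create_pages.1) (pvDiffWitness_create_pages.2) = pvDiffWitnessOut_create_pages.2 ∧ pvDiffWitnessOut_create_pages.1 ≠ pvDiffWitnessOut_create_pages.2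
def Claim_exact_create_pages : Prop := ∀ (books_dict : List (String × List String)) (max_books : Int), Dom_create_pages books_dict max_books → Pre_create_pages books_dict max_books → D_create_pages books_dict max_books → create_pages books_dict max_books ≠ create_pages_alt books_dict max_books

-- ===== LEMMAS AND PROOFS =====

-- ''.join on List String, unfolded one element at a time
theorem pv_inter_nil (l : List (List Char)) : List.intercalate [] l = l.flatten := by
  induction l with
  | nil => simp [List.intercalate]
  | cons a r ih =>
    cases r with
    | nil => simp [List.intercalate]
    | cons b t =>
      simp [List.intercalate, List.intersperse] at *
      simpa using ih

theorem pv_join_nil : PySem.Str.join "" ([] : List String) = "" := by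
  apply String.ext
  simp [PySem.Str.toList_join, PySem.Chars.join, pv_inter_nil]

theorem pv_join_cons (t : String) (r : List String) :
    PySem.Str.join "" (t :: r) = t ++ PySem.Str.join "" r := by
  apply String.ext
  simp [PySem.Str.toList_join, PySem.Chars.join, pv_inter_nil]

-- A's texts, read off in loop order starting at counter i
def pvTextsFrom (mb : Int) : Int → List (String × List String) → List String
  | _, [] => []
  | i, kv :: r =>
    (if i == 1 then (page_strings mb (PySem.List.pyGetD kv.2 1 "") (PySem.List.pyGetD kv.2 0 "") kv.1).1
     else (page_strings mb (PySem.List.pyGetD kv.2 1 "") (PySem.List.pyGetD kv.2 0 "") kv.1).2)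
    :: pvTextsFrom mb (i + 1) r

theorem pv_text_other (mb : Int) (k : String) (v : List String) :
    (page_strings mb (PySem.List.pyGetD v 1 "") (PySem.List.pyGetD v 0 "") k).2 = pvBodyText k v := rfl

theorem pv_text_first (mb : Int) (k : String) (v : List String) :
    (page_strings mb (PySem.List.pyGetD v 1 "") (PySem.List.pyGetD v 0 "") k).1 =
      pvHeader mb ++ pvBodyText k v := rfl

theorem pv_textsFrom_tail (mb : Int) (l : List (String × List String)) :
    ∀ i : Int, 2 ≤ i → pvTextsFrom mb i l = l.map (fun kv => pvBodyText kv.1 kv.2) := by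
  induction l with
  | nil => intro i _; simp [pvTextsFrom]
  | cons kv r ih =>
    intro i hi
    have hne : ¬ ((i : Int) == 1) = true := by simp; omega
    simp only [pvTextsFrom, hne, Bool.false_eq_true, if_false, List.map_cons,
      pv_text_other, ih (i + 1) (by omega)]

-- A's texts from counter 1 = B's headered render list
theorem pv_textsFrom_one (mb : Int) (l : List (String × List String)) :
    pvTextsFrom mb 1 l = pvHeadered mb (l.map (fun kv => pvBodyText kv.1 kv.2)) := by
  cases l with
  | nil => simp [pvTextsFrom, pvHeadered]
  | cons kv r =>
    simp only [pvTextsFrom, List.map_cons, pvHeadered]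
    rw [show (1 + 1 : Int) = 2 by norm_num, pv_textsFrom_tail mb r 2 (by omega)]
    simp [pv_text_first]

theorem pv_textsFrom_length (mb : Int) (l : List (String × List String)) :
    ∀ i, (pvTextsFrom mb i l).length = l.length := by
  induction l with
  | nil => intro i; simp [pvTextsFrom]
  | cons kv r ih => intro i; simp [pvTextsFrom, ih]

theorem pv_textsFrom_append (mb : Int) (a b : List (String × List String)) :
    ∀ i, pvTextsFrom mb i (a ++ b) = pvTextsFrom mb i a ++ pvTextsFrom mb (i + a.length) b := by
  induction a with
  | nil => intro i; simp [pvTextsFrom]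
  | cons kv r ih =>
    intro i
    simp only [List.cons_append, pvTextsFrom, ih (i + 1), List.length_cons]
    have hidx : (i + ((r.length : Int) + 1)) = i + 1 + (r.length : Int) := by ring
    push_cast
    rw [hidx]

-- max_books = 5: A's loop body is the identity
theorem pv_foldl_id (l : List (String × List String)) (st : List (List String) × Int × String) :
    l.foldl (pvStepA 5) st = st := by
  induction l generalizing st with
  | nil => rfl
  | cons kv r ih =>
    rw [List.foldl_cons, show pvStepA 5 st kv = st by simp [pvStepA]]
    exact ih st

-- max_books < 5: the loop only accumulates
theorem pv_foldl_lt (mb : Int) (hmb : mb < 5) (l : List (String × List String)) :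
    ∀ (i : Int) (pages : List (List String)) (s : String),
      l.foldl (pvStepA mb) (pages, i, s) =
        (pages, i + l.length, s ++ PySem.Str.join "" (pvTextsFrom mb i l)) := by
  induction l with
  | nil => intro i pages s; simp [pvTextsFrom, pv_join_nil]
  | cons kv r ih =>
    intro i pages s
    rw [List.foldl_cons]
    have hstep : pvStepA mb (pages, i, s) kv =
        (pages, i + 1,
          s ++ (if i == 1 then (page_strings mb (PySem.List.pyGetD kv.2 1 "") (PySem.List.pyGetD kv.2 0 "") kv.1).1
                else (page_strings mb (PySem.List.pyGetD kv.2 1 "") (PySem.List.pyGetD kv.2 0 "") kv.1).2)) := by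
      simp only [pvStepA, if_pos hmb]
      split <;> rfl
    rw [hstep, ih]
    simp only [pvTextsFrom, pv_join_cons, List.length_cons, Prod.mk.injEq]
    refine ⟨trivial, by push_cast; ring, by simp [String.append_assoc]⟩

-- accumulating run of the > 5 loop: no counter value in the window is divisible by 5
theorem pv_foldl_acc (mb : Int) (hmb : 5 < mb) (l : List (String × List String)) :
    ∀ (i : Int) (pages : List (List String)) (s : String), 1 ≤ i →
      (∀ k : Nat, k < l.length → PySem.Int.mod (i + k) 5 ≠ 0) →
      l.foldl (pvStepA mb) (pages, i, s) =
        (pages, i + l.length, s ++ PySem.Str.join "" (pvTextsFrom mb i l)) := by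
  induction l with
  | nil => intro i pages s _ _; simp [pvTextsFrom, pv_join_nil]
  | cons kv r ih =>
    intro i pages s hi hmod
    rw [List.foldl_cons]
    have hstep : pvStepA mb (pages, i, s) kv =
        (pages, i + 1,
          s ++ (if i == 1 then (page_strings mb (PySem.List.pyGetD kv.2 1 "") (PySem.List.pyGetD kv.2 0 "") kv.1).1
                else (page_strings mb (PySem.List.pyGetD kv.2 1 "") (PySem.List.pyGetD kv.2 0 "") kv.1).2)) := by
      have h0 := hmod 0 (by simp)
      simp only [Nat.cast_zero, add_zero] at h0
      simp only [pvStepA]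
      rw [if_neg (by omega : ¬ mb < 5), if_pos hmb]
      by_cases h1 : i = 1
      · subst h1; simp
      · have hb : ¬ ((i : Int) == 1) = true := by simpa using h1
        rw [if_neg hb, if_pos h0, if_neg hb]
    rw [hstep, ih (i + 1) pages _ (by omega)
      (by intro k hk
          have := hmod (k + 1) (by simpa using Nat.succ_lt_succ hk)
          have he : (i + 1 + (k : Int)) = i + ((k : Nat) + 1 : Nat) := by push_cast; ring
          rw [he]
          exact this)]
    simp only [pvTextsFrom, pv_join_cons, List.length_cons, Prod.mk.injEq]
    refine ⟨trivial, by push_cast; ring, by simp [String.append_assoc]⟩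

theorem pv_mod5 (m : Nat) (k : Nat) :
    PySem.Int.mod ((5 * m + 1 : Int) + k) 5 = (k + 1) % 5 := by
  rw [PySem.Int.mod_eq_emod_of_pos (by norm_num)]
  omega

theorem pv_join_append (a b : List String) :
    PySem.Str.join "" (a ++ b) = PySem.Str.join "" a ++ PySem.Str.join "" b := by
  induction a with
  | nil => simp [pv_join_nil]
  | cons t r ih =>
    apply String.ext
    simp [pv_join_cons, ih]

-- one full chunk of five flushes the page and resets the counter phase
theorem pv_foldl_chunk (mb : Int) (hmb : 5 < mb) (l : List (String × List String)) (hl : l.length = 5)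
    (m : Nat) (pages : List (List String)) (s : String) :
    l.foldl (pvStepA mb) (pages, (5 * m + 1 : Int), s) =
      (pages ++ [[s ++ PySem.Str.join "" (pvTextsFrom mb (5 * m + 1) l)]], (5 * (((m + 1 : Nat)) : Int) + 1), "") := by
  have hne : l ≠ [] := by intro h; rw [h] at hl; simp at hl
  obtain ⟨a, e, rfl⟩ : ∃ a e, l = a ++ [e] := ⟨l.dropLast, l.getLast hne, (List.dropLast_append_getLast hne).symm⟩
  have ha : a.length = 4 := by simpa using hl
  rw [List.foldl_append]
  rw [pv_foldl_acc mb hmb a _ pages s (by omega)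
    (by intro k hk
        rw [pv_mod5 m k]
        omega)]
  rw [ha]
  have hi5 : (5 * m + 1 : Int) + (4 : Nat) = 5 * m + 5 := by push_cast; ring
  rw [hi5]
  have hmod : PySem.Int.mod (5 * m + 5 : Int) 5 = 0 := by
    rw [PySem.Int.mod_eq_emod_of_pos (by norm_num)]; omega
  have hne1 : ¬ (((5 * m + 5 : Int)) == 1) = true := by simp only [beq_iff_eq]; omega
  rw [List.foldl_cons, List.foldl_nil]
  simp only [pvStepA]
  rw [if_neg (by omega : ¬ mb < 5), if_pos hmb, if_neg hne1,
      if_neg (by simpa using hmod)]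
  simp only [Prod.mk.injEq]
  refine ⟨?_, by push_cast; ring, by trivial⟩
  congr 2
  rw [pv_textsFrom_append, ha, pv_join_append]
  simp only [pvTextsFrom]
  rw [hi5]
  simp only [hne1, Bool.false_eq_true, if_false]
  simp [pv_join_cons, pv_join_nil, String.append_assoc]

-- A's paging of a text list: full pages of five plus ALWAYS a final (possibly empty) remainder page
def pvChunksA (ts : List String) : List (List String) :=
  if hlen : (ts.take 5).length < 5 then [[PySem.Str.join "" (ts.take 5)]]
  else [PySem.Str.join "" (ts.take 5)] :: pvChunksA (ts.drop 5)
termination_by ts.length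
decreasing_by simp only [List.length_take, List.length_drop] at hlen ⊢; omega

-- B's paging of a text list: pages of five, the last one the (nonempty) remainder
def pvChunksB (ts : List String) : List (List String) :=
  if h : ts = [] then []
  else [PySem.Str.join "" (ts.take 5)] :: pvChunksB (ts.drop 5)
termination_by ts.length
decreasing_by
  simp only [List.length_drop]
  have : 0 < ts.length := List.length_pos_iff.mpr h
  omega

theorem pv_chunksA_shape (ts : List String) : ∃ t r, pvChunksA ts = [t] :: r := by
  rw [pvChunksA]
  split
  · exact ⟨_, _, rfl⟩
  · exact ⟨_, _, rfl⟩

-- prepend the partial page already accumulated to the first chunk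
def pvWithPrefix (s : String) : List (List String) → List (List String)
  | [t] :: r => [s ++ t] :: r
  | x => x

theorem pv_withPrefix_empty (ts : List String) : pvWithPrefix "" (pvChunksA ts) = pvChunksA ts := by
  obtain ⟨t, r, h⟩ := pv_chunksA_shape ts
  rw [h]
  simp [pvWithPrefix]

-- the > 5 loop, followed by the final append, is pvChunksA
theorem pv_foldl_gt (mb : Int) (hmb : 5 < mb) :
    ∀ (n : Nat) (l : List (String × List String)), l.length ≤ n →
    ∀ (m : Nat) (pages : List (List String)) (s : String),
      (let st := l.foldl (pvStepA mb) (pages, (5 * m + 1 : Int), s); st.1 ++ [[st.2.2]]) =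
        pages ++ pvWithPrefix s (pvChunksA (pvTextsFrom mb (5 * m + 1) l)) := by
  intro n
  induction n with
  | zero =>
    intro l hl m pages s
    have : l = [] := List.length_eq_zero_iff.mp (by omega)
    subst this
    simp [pvTextsFrom, pvChunksA, pvWithPrefix, pv_join_nil]
  | succ n ih =>
    intro l hl m pages s
    by_cases hlen : l.length < 5
    · rw [show (let st := l.foldl (pvStepA mb) (pages, (5 * m + 1 : Int), s); st.1 ++ [[st.2.2]]) =
          (l.foldl (pvStepA mb) (pages, (5 * m + 1 : Int), s)).1 ++
            [[(l.foldl (pvStepA mb) (pages, (5 * m + 1 : Int), s)).2.2]] from rfl]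
      rw [pv_foldl_acc mb hmb l _ pages s (by omega)
        (by intro k hk
            rw [pv_mod5 m k]
            omega)]
      have hts : (pvTextsFrom mb (5 * m + 1) l).length < 5 := by
        rw [pv_textsFrom_length]; exact hlen
      rw [pvChunksA]
      rw [dif_pos (by simpa using (by omega : min 5 (pvTextsFrom mb (5 * ↑m + 1) l).length < 5))]
      simp only [pvWithPrefix]
      have : (pvTextsFrom mb (5 * m + 1) l).take 5 = pvTextsFrom mb (5 * m + 1) l :=
        List.take_of_length_le (by omega)
      rw [this]
    · -- a full chunk of five, then the rest
      have hsplit : l = l.take 5 ++ l.drop 5 := (List.take_append_drop 5 l).symm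
      have htk : (l.take 5).length = 5 := by simp; omega
      conv_lhs => rw [hsplit]
      rw [show (let st := (l.take 5 ++ l.drop 5).foldl (pvStepA mb) (pages, (5 * m + 1 : Int), s); st.1 ++ [[st.2.2]]) =
          (let st := (l.drop 5).foldl (pvStepA mb) ((l.take 5).foldl (pvStepA mb) (pages, (5 * m + 1 : Int), s)); st.1 ++ [[st.2.2]]) by
        rw [List.foldl_append]]
      rw [pv_foldl_chunk mb hmb _ htk m pages s]
      rw [ih (l.drop 5) (by simp; omega) (m + 1) _ ""]
      rw [pv_withPrefix_empty]
      have hts : pvTextsFrom mb (5 * m + 1) l =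
          pvTextsFrom mb (5 * m + 1) (l.take 5) ++ pvTextsFrom mb (5 * (m + 1) + 1) (l.drop 5) := by
        conv_lhs => rw [hsplit]
        have h55 : ((5 * (m:Int) + 1) + ((5:Nat):Int)) = 5 * ((m:Int) + 1) + 1 := by push_cast; ring
        rw [pv_textsFrom_append, htk, h55]
      have htl : (pvTextsFrom mb (5 * m + 1) (l.take 5)).length = 5 := by
        rw [pv_textsFrom_length]; exact htk
      rw [hts]
      conv_rhs => rw [pvChunksA]
      rw [List.take_left' htl, List.drop_left' htl,
          dif_neg (by rw [htl]; omega)]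
      simp [pvWithPrefix, List.append_assoc]

-- B's range(0, len, 5) loop, rebased on Nat chunk indices
theorem pv_range5_map {α : Type} (f : Int → α) (L : Nat) :
    (PySem.List.pyRange 0 L 5).map f =
      (List.range ((L + 4) / 5)).map (fun k => f ((5 * k : Nat) : Int)) := by
  rw [PySem.List.pyRange_of_pos 0 (L:Int) (show (0:Int) < 5 by norm_num), List.map_map]
  have hcount : (if (0:Int) < (L:Int) then (((L:Int) - 0 + 5 - 1) / 5).toNat else 0) = (L + 4) / 5 := by
    by_cases h : 0 < L
    · rw [if_pos (by exact_mod_cast h)]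
      have : ((L:Int) - 0 + 5 - 1) = ((L + 4 : Nat) : Int) := by push_cast; ring
      rw [this, show ((5:Int) = ((5:Nat):Int)) from rfl, ← Int.natCast_div, Int.toNat_natCast]
    · have : L = 0 := by omega
      subst this
      norm_num
  rw [hcount]
  refine List.map_congr_left (fun k _ => ?_)
  show f (0 + 5 * (k : Int)) = f ((5 * k : Nat) : Int)
  congr 1
  push_cast
  ring

theorem pv_chunksB_eq_map :
    ∀ (n : Nat) (ts : List String), ts.length ≤ n →
      (List.range ((ts.length + 4) / 5)).map
        (fun k => [PySem.Str.join "" ((ts.drop (5 * k)).take 5)]) = pvChunksB ts := by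
  intro n
  induction n with
  | zero =>
    intro ts h
    have : ts = [] := List.length_eq_zero_iff.mp (by omega)
    subst this
    rw [pvChunksB]
    simp
  | succ n ih =>
    intro ts h
    by_cases hnil : ts = []
    · subst hnil
      rw [pvChunksB]
      simp
    · have hpos : 0 < ts.length := List.length_pos_iff.mpr hnil
      rw [pvChunksB, dif_neg hnil]
      have hm : (ts.length + 4) / 5 = ((ts.drop 5).length + 4) / 5 + 1 := by
        simp only [List.length_drop]
        omega
      rw [hm, List.range_succ_eq_map, List.map_cons, List.map_map]
      refine congrArg₂ List.cons (by norm_num) ?_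
      rw [← ih (ts.drop 5) (by simp only [List.length_drop]; omega)]
      refine List.map_congr_left (fun k _ => ?_)
      simp only [Function.comp_apply, List.drop_drop]
      have h55 : 5 * (k + 1) = 5 + 5 * k := by ring
      simp only [Nat.succ_eq_add_one, h55]

-- the slice texts[j:j+5] at j = 5*k is drop/take
theorem pv_slice_chunk (ts : List String) (k : Nat) :
    PySem.List.slice ts (some ((5 * k : Nat) : Int)) (some (((5 * k : Nat) : Int) + 5)) =
      (ts.drop (5 * k)).take 5 := by
  rw [show ((5:Int) = ((5:Nat):Int)) from rfl, PySem.List.slice_natCast_add]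

-- B's whole > 5 branch is pvChunksB
theorem pv_alt_gt (ts : List String) :
    (PySem.List.pyRange 0 ts.length 5).map
      (fun j => [PySem.Str.join "" (PySem.List.slice ts (some j) (some (j + 5)))]) =
      pvChunksB ts := by
  rw [pv_range5_map (fun j => [PySem.Str.join "" (PySem.List.slice ts (some j) (some (j + 5)))]) ts.length]
  rw [← pv_chunksB_eq_map ts.length ts (le_refl _)]
  refine List.map_congr_left (fun k _ => ?_)
  rw [pv_slice_chunk]

-- B, branch by branch
theorem pv_alt_def (bd : List (String × List String)) (mb : Int) :
    create_pages_alt bd mb =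
      (if mb ≤ 5 then [[PySem.Str.join "" (pvHeadered mb (bd.map (fun kv => pvBodyText kv.1 kv.2)))]]
       else pvChunksB (pvHeadered mb (bd.map (fun kv => pvBodyText kv.1 kv.2)))) := by
  simp only [create_pages_alt]
  split
  · rfl
  · exact pv_alt_gt _

-- where the book count is not a multiple of five, A's and B's pagings agree
theorem pv_chunksA_eq_B :
    ∀ (n : Nat) (ts : List String), ts.length ≤ n → ts.length % 5 ≠ 0 →
      pvChunksA ts = pvChunksB ts := by
  intro n
  induction n with
  | zero =>
    intro ts h hm
    have : ts = [] := List.length_eq_zero_iff.mp (by omega)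
    subst this
    simp at hm
  | succ n ih =>
    intro ts h hm
    have hnil : ts ≠ [] := by intro hn; subst hn; simp at hm
    have hpos : 0 < ts.length := List.length_pos_iff.mpr hnil
    by_cases hlen : ts.length < 5
    · rw [pvChunksA, dif_pos (by simp; omega), pvChunksB, dif_neg hnil]
      have hdrop : ts.drop 5 = [] := List.drop_eq_nil_of_le (by omega)
      rw [hdrop, pvChunksB]
      simp
    · rw [pvChunksA, dif_neg (by simp; omega), pvChunksB, dif_neg hnil]
      congr 1
      exact ih (ts.drop 5) (by simp only [List.length_drop]; omega)
        (by simp only [List.length_drop]; omega)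

-- page counts, for the tightness proof
theorem pv_chunksA_len :
    ∀ (n : Nat) (ts : List String), ts.length ≤ n → ts.length % 5 = 0 →
      (pvChunksA ts).length = ts.length / 5 + 1 := by
  intro n
  induction n with
  | zero =>
    intro ts h hm
    have : ts = [] := List.length_eq_zero_iff.mp (by omega)
    subst this
    rw [pvChunksA]
    simp
  | succ n ih =>
    intro ts h hm
    by_cases hlen : ts.length < 5
    · have h0 : ts.length = 0 := by omega
      rw [pvChunksA, dif_pos (by simp; omega)]
      simp [h0]
    · rw [pvChunksA, dif_neg (by simp; omega)]
      rw [List.length_cons, ih (ts.drop 5) (by simp only [List.length_drop]; omega)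
        (by simp only [List.length_drop]; omega)]
      simp only [List.length_drop]
      omega

theorem pv_chunksB_len :
    ∀ (n : Nat) (ts : List String), ts.length ≤ n → ts.length % 5 = 0 →
      (pvChunksB ts).length = ts.length / 5 := by
  intro n
  induction n with
  | zero =>
    intro ts h hm
    have : ts = [] := List.length_eq_zero_iff.mp (by omega)
    subst this
    rw [pvChunksB]
    simp
  | succ n ih =>
    intro ts h hm
    by_cases hnil : ts = []
    · subst hnil
      rw [pvChunksB]
      simp
    · have hpos : 0 < ts.length := List.length_pos_iff.mpr hnil
      rw [pvChunksB, dif_neg hnil]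
      rw [List.length_cons, ih (ts.drop 5) (by simp only [List.length_drop]; omega)
        (by simp only [List.length_drop]; omega)]
      simp only [List.length_drop]
      omega

theorem pv_headered_length (mb : Int) (ts : List String) :
    (pvHeadered mb ts).length = ts.length := by
  cases ts <;> simp [pvHeadered]

-- A on the > 5 side, assembled
theorem pv_A_gt (bd : List (String × List String)) (mb : Int) (hmb : 5 < mb) :
    create_pages bd mb = pvChunksA (pvTextsFrom mb 1 bd) := by
  unfold create_pages
  have := pv_foldl_gt mb hmb bd.length bd (le_refl _) 0 [] ""
  simp only [List.nil_append] at this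
  rw [show ((5 * ((0:Nat):Int) + 1 : Int) = 1) by norm_num] at this
  rw [this, pv_withPrefix_empty]

-- ===== VERDICT (by name: the statement is the Claim_ definition above) =====
theorem create_pages_spec : Claim_unchanged_create_pages := by
  intro bd mb _ _
  unfold Spec_create_pages
  intro hnd
  unfold D_create_pages at hnd
  push_neg at hnd
  rw [pv_alt_def]
  by_cases hlt : mb < 5
  · rw [if_pos (by omega : mb ≤ 5)]
    unfold create_pages
    rw [pv_foldl_lt mb hlt bd 1 [] ""]
    simp [pv_textsFrom_one]
  · by_cases h5 : mb = 5
    · subst h5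
      have hbd : bd = [] := hnd.1 rfl
      subst hbd
      rw [if_pos (by omega : (5:Int) ≤ 5)]
      unfold create_pages
      simp [pvHeadered, pv_join_nil]
    · have hgt : 5 < mb := by omega
      have hmod : bd.length % 5 ≠ 0 := hnd.2 hgt
      rw [if_neg (by omega : ¬ mb ≤ 5), pv_A_gt bd mb hgt, pv_textsFrom_one]
      apply pv_chunksA_eq_B (pvHeadered mb (bd.map fun kv => pvBodyText kv.1 kv.2)).length
      · exact le_refl _
      · rw [pv_headered_length, List.length_map]; exact hmod

set_option maxRecDepth 8192 in
theorem create_pages_changed : Claim_changed_create_pages := by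
  unfold Claim_changed_create_pages
  refine ⟨by decide, by decide, by unfold D_create_pages; decide, ?_, ?_, by decide⟩
  · decide
  · decide

theorem create_pages_tight : Claim_exact_create_pages := by
  intro bd mb _ _ hd
  unfold D_create_pages at hd
  rw [pv_alt_def]
  rcases hd with ⟨h5, hne⟩ | ⟨hgt, hmod⟩
  · subst h5
    rw [if_pos (by omega : (5:Int) ≤ 5)]
    unfold create_pages
    rw [pv_foldl_id]
    cases bd with
    | nil => exact absurd rfl hne
    | cons kv r =>
      simp only [List.map_cons, pvHeadered, pv_join_cons, List.nil_append,
        List.cons.injEq, ne_eq, and_true]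
      intro h
      have h1 : "" = (pvHeader 5 ++ pvBodyText kv.1 kv.2) ++
          PySem.Str.join "" (r.map fun kv => pvBodyText kv.1 kv.2) := by
        simpa using h
      have h2 := congrArg (fun s : String => s.toList.length) h1
      simp only [pvHeader, String.toList_append, List.length_append] at h2
      have hp : 0 < ("🔎  Найдено всего книг: ").toList.length := by decide
      have h0 : ("" : String).toList.length = 0 := rfl
      omega
  · rw [if_neg (by omega : ¬ mb ≤ 5), pv_A_gt bd mb hgt, pv_textsFrom_one]
    intro h
    have hlen : (pvHeadered mb (bd.map fun kv => pvBodyText kv.1 kv.2)).length % 5 = 0 := by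
      rw [pv_headered_length, List.length_map]; exact hmod
    have h1 := congrArg List.length h
    rw [pv_chunksA_len _ _ (le_refl _) hlen, pv_chunksB_len _ _ (le_refl _) hlen] at h1
    omega
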